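-- pv_equiv track=rewrite | github.com/xer0Xavishek/LAB-SLOVE | LAB N 2/D.py | binaryString
-- ===== SOURCE A (Python) =====
-- def binaryString(s):
--     l, r = 0, len(s) - 1
--     result = -1
--
--     while l <= r:
--         mid = (l + r) // 2
--         if s[mid] == '1':
--             result = mid + 1  # Use 1-based index
--             r = mid - 1
--         else:
--             l = mid + 1
--
--     return result
-- ===== SOURCE B (Python) =====
-- def binaryString(s):
--     # Fuel-bounded fold of a pure step function: no condition-driven while loop and
--     # no mutable l/r/result variables; the state is an immutable triple and the step
--     # is the identity once the interval is empty. n iterations suffice because each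
--     # active step strictly shrinks the interval.
--     def step(state):
--         l, r, res = state
--         if l > r:
--             return state
--         mid = (l + r) // 2
--         if s[mid] == '1':
--             return (l, mid - 1, mid + 1)
--         return (mid + 1, r, res)
--
--     state = (0, len(s) - 1, -1)
--     for _ in range(len(s)):
--         state = step(state)
--     return state[2]
-- ===== Notes on version B (the rewrite author's own statement) =====
-- stated objective: alternative
-- what changed: A's condition-driven while loop with three mutable variables is replaced by folding a pure step function (identity once the interval is empty) over a fixed fuel of len(s) iterations on an immutable state triple; correctness of the fuel bound rests on the interval strictly shrinking each active step.
import Mathlib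
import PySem

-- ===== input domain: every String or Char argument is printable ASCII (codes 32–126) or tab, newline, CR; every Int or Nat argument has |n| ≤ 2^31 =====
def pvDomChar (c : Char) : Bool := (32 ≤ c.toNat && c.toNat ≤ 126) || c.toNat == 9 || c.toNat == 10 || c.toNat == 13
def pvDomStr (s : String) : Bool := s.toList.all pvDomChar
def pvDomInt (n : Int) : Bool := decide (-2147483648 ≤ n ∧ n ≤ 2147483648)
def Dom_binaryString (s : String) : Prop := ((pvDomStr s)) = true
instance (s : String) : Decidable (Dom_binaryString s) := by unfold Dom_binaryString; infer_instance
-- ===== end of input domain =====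

-- B replaces A's condition-driven while loop (mutable l/r/result) by a fold of a pure
-- step function over a fixed fuel of len(s) iterations on an immutable state triple.

-- ===== PORT A =====
-- the while loop of A, step for step: state (l, r, result)
def binAuxA (s : List Char) (l r result : Int) : Int :=
  if _h : l ≤ r then
    let mid := PySem.Int.floordiv (l + r) 2
    if PySem.List.pyGet? s mid = some '1' then
      binAuxA s l (mid - 1) (mid + 1)
    else
      binAuxA s (mid + 1) r result
  else result
termination_by (r + 1 - l).toNat
decreasing_by
  · have := PySem.Int.floordiv_two_mid_bounds _h; omega
  · have := PySem.Int.floordiv_two_mid_bounds _h; omega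

def binaryString (s : String) : Int :=
  binAuxA s.toList 0 (PySem.Str.len s - 1) (-1)

-- ===== PORT B =====
-- Source B's step(state): identity once the interval is empty
def stepB (s : List Char) (st : Int × Int × Int) : Int × Int × Int :=
  if st.1 > st.2.1 then st
  else
    let mid := PySem.Int.floordiv (st.1 + st.2.1) 2
    if PySem.List.pyGet? s mid = some '1' then (st.1, mid - 1, mid + 1)
    else (mid + 1, st.2.1, st.2.2)

def binaryString_alt (s : String) : Int :=
  ((PySem.List.pyRange 0 (PySem.Str.len s) 1).foldl
      (fun st _ => stepB s.toList st) (0, PySem.Str.len s - 1, -1)).2.2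

-- ===== PRECONDITION & SPEC =====
def Spec_binaryString (s : String) (out : Int) : Prop := out = binaryString_alt s
instance (s : String) (out : Int) : Decidable (Spec_binaryString s out) := by unfold Spec_binaryString; infer_instance

-- ===== CLAIM (what is proved, stated in full; the proofs are below) =====
def Claim_equal_binaryString : Prop := ∀ (s : String), Dom_binaryString s → Spec_binaryString s (binaryString s)

-- ===== LEMMAS AND PROOFS =====

-- B's fuelled fold computes A's loop whenever the fuel covers the interval length:
-- once the interval empties the step is the identity, and each active step shrinks it.
theorem foldl_stepB_eq_binAuxA (s : List Char) :
    ∀ (xs : List Int) (l r res : Int), (r + 1 - l).toNat ≤ xs.length →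
      (xs.foldl (fun st _ => stepB s st) (l, r, res)).2.2 = binAuxA s l r res := by
  intro xs
  induction xs with
  | nil =>
    intro l r res h
    rw [binAuxA]
    have : ¬ l ≤ r := by simp at h; omega
    simp [this]
  | cons x xs ih =>
    intro l r res h
    rw [List.foldl_cons, binAuxA, stepB]
    by_cases hlr : l ≤ r
    · have hmid := PySem.Int.floordiv_two_mid_bounds hlr
      simp only [hlr, dif_pos, show ¬ l > r by omega, if_neg, not_false_iff]
      set mid := PySem.Int.floordiv (l + r) 2 with hmd
      by_cases hc : PySem.List.pyGet? s mid = some '1'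
      · simp only [hc, if_pos]
        exact ih l (mid - 1) (mid + 1) (by simp at h ⊢; omega)
      · simp only [hc, if_neg, not_false_iff]
        exact ih (mid + 1) r res (by simp at h ⊢; omega)
    · simp only [show l > r by omega, if_pos, hlr, dif_neg, not_false_iff]
      have := ih l r res (by omega)
      rw [this, binAuxA]
      simp [hlr]

theorem binaryString_spec : Claim_equal_binaryString := by
  intro s _
  unfold Spec_binaryString binaryString binaryString_alt
  rw [foldl_stepB_eq_binAuxA s.toList _ 0 (PySem.Str.len s - 1) (-1)]
  rw [PySem.List.length_pyRange_one]
  simp [PySem.Str.len]
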